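-- pv_equiv track=rewrite | github.com/amdaretejas/finding-XYZ | study.py | best_pick
-- ===== SOURCE A (Python) =====
-- def best_pick(boxes):
--     new_list = []
--     last_box_h = 0
--     last_box_l = 5000
--     boxes = sorted(boxes, key=lambda box:(box[2]))
--     for box in boxes:
--         if last_box_h <= box[2]:
--             last_box_h = box[2]
--             if len(new_list) > 0:
--                 if (new_list[0][2] + 50) > box[2]:
--                     new_list.append(box)
--             else:
--                 new_list.append(box)
--
--     last_box_h = 0
--     last_box_l = 5000
--     boxes = sorted(new_list, key=lambda box:(box[1]))
--     for box in boxes: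
--         if last_box_h <= box[1]:
--             last_box_h = box[1]
--             if len(new_list) > 0:
--                 if (new_list[0][1] + 20) > box[1]:
--                     new_list.append(box)
--             else:
--                 new_list.append(box)
--     boxes = sorted(new_list, key=lambda box:(-box[0]))
--     best_box = boxes[0]
--     return best_box
-- ===== SOURCE B (Python) =====
-- def best_pick(boxes):
--     best = None
--     z0 = None
--     for b in sorted(boxes, key=lambda b: b[2]):
--         if b[2] >= 0:
--             if z0 is None:
--                 z0 = b[2]
--             if b[2] < z0 + 50 and (best is None or b[0] > best[0]):
--                 best = b
--     return best[0], best[1], best[2]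
-- ===== Notes on version B (the rewrite author's own statement) =====
-- stated objective: simpler
-- what changed: Replaced A's three stable sorts plus two filter/append phases (the second of which only appends duplicates) by one sort by z and a single left-to-right pass that fixes z0 at the first nonnegative z and keeps the running maximum by the first coordinate.
import Mathlib
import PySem

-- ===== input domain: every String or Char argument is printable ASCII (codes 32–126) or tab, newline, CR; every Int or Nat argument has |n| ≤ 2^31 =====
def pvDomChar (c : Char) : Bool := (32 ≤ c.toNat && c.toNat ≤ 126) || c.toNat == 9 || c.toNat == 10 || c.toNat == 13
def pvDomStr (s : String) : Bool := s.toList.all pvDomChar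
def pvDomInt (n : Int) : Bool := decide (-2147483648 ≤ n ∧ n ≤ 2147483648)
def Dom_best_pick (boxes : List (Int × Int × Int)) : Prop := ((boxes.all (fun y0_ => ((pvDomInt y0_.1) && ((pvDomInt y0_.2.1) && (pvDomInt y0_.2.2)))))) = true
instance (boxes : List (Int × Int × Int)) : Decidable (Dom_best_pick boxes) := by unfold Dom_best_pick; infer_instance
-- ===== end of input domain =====

-- B replaces A's three stable sorts and two filtering/append phases by one sort by z plus a
-- single left-to-right fold keeping the running maximum by the first coordinate (objective: simpler).

-- ===== PORT A =====
-- phase-1 loop body: 'if last_box_h <= box[2]: …' (len(new_list) > 0 ⇔ the list is a cons)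
def pvF1 (st : List (Int × Int × Int) × Int) (box : Int × Int × Int) :
    List (Int × Int × Int) × Int :=
  if st.2 ≤ box.2.2 then
    match st.1 with
    | [] => (st.1 ++ [box], box.2.2)
    | b0 :: _ => if b0.2.2 + 50 > box.2.2 then (st.1 ++ [box], box.2.2) else (st.1, box.2.2)
  else st

-- phase-2 loop body: same shape with index [1] and threshold +20
def pvF2 (st : List (Int × Int × Int) × Int) (box : Int × Int × Int) :
    List (Int × Int × Int) × Int :=
  if st.2 ≤ box.2.1 then
    match st.1 with
    | [] => (st.1 ++ [box], box.2.1)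
    | b0 :: _ => if b0.2.1 + 20 > box.2.1 then (st.1 ++ [box], box.2.1) else (st.1, box.2.1)
  else st

def best_pick (boxes : List (Int × Int × Int)) : Int × Int × Int :=
  let s1 := PySem.List.sorted boxes (fun box => box.2.2) false
  let nl1 := (s1.foldl pvF1 ([], 0)).1
  let s2 := PySem.List.sorted nl1 (fun box => box.2.1) false
  let nl2 := (s2.foldl pvF2 (nl1, 0)).1
  match PySem.List.sorted nl2 (fun box => -box.1) false with
  | best :: _ => best
  | [] => (0, 0, 0)   -- boxes[0] on the empty list: IndexError, excluded by Pre_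

-- ===== PORT B =====
-- loop body of Source B: state = (z0 : Option Int, best : Option box)
def pvG (st : Option Int × Option (Int × Int × Int)) (b : Int × Int × Int) :
    Option Int × Option (Int × Int × Int) :=
  if 0 ≤ b.2.2 then
    let z0 := st.1.getD b.2.2
    (some z0,
      if decide (b.2.2 < z0 + 50) &&
         (match st.2 with | none => true | some m => decide (m.1 < b.1)) then some b
      else st.2)
  else st

def best_pick_alt (boxes : List (Int × Int × Int)) : Int × Int × Int :=
  let st := (PySem.List.sorted boxes (fun b => b.2.2) false).foldl pvG (none, none)
  match st.2 with
  | some best => best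
  | none => (0, 0, 0)   -- best is None: Source B raises TypeError, excluded by Pre_

-- ===== PRECONDITION & SPEC =====
-- Pre_ excludes exactly the inputs with no box of nonnegative z-coordinate, on which
-- A raises IndexError (and B raises TypeError).
def Pre_best_pick (boxes : List (Int × Int × Int)) : Prop :=
  ∃ b ∈ boxes, 0 ≤ b.2.2
instance (boxes : List (Int × Int × Int)) : Decidable (Pre_best_pick boxes) := by
  unfold Pre_best_pick; infer_instance

def pvWitness_best_pick : (List (Int × Int × Int)) := [(1, 2, 3), (5, 0, 0), (4, 1, 49)]

def Spec_best_pick (boxes : List (Int × Int × Int)) (out : Int × Int × Int) : Prop :=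
  out = best_pick_alt boxes
instance (boxes : List (Int × Int × Int)) (out : Int × Int × Int) :
    Decidable (Spec_best_pick boxes out) := by unfold Spec_best_pick; infer_instance

-- ===== CLAIM (what is proved, stated in full; the proofs are below) =====
def Claim_equal_best_pick : Prop :=
  ∀ (boxes : List (Int × Int × Int)), Dom_best_pick boxes → Pre_best_pick boxes →
    Spec_best_pick boxes (best_pick boxes)

-- ===== LEMMAS AND PROOFS =====

-- the running-maximum step both final results reduce to
def pvPick (m x : Int × Int × Int) : Int × Int × Int := if m.1 < x.1 then x else m

-- Phase 1 after the first accepted box: every later box passes the 'last_box_h <= z' guard,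
-- and is appended iff z < (head z) + 50.
theorem pvP1b (l : List (Int × Int × Int)) (b0 : Int × Int × Int) :
    ∀ (acc : List (Int × Int × Int)) (h : Int),
    (∀ y ∈ l, h ≤ y.2.2) → l.Pairwise (fun a b => a.2.2 ≤ b.2.2) →
    (l.foldl pvF1 (b0 :: acc, h)).1
      = (b0 :: acc) ++ l.filter (fun b => decide (b0.2.2 + 50 > b.2.2)) := by
  induction l with
  | nil => intro acc h _ _; simp
  | cons y l ih =>
    intro acc h hmono hpair
    have hy : h ≤ y.2.2 := hmono y (by simp)
    rw [List.pairwise_cons] at hpair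
    have step : pvF1 (b0 :: acc, h) y =
        (if b0.2.2 + 50 > y.2.2 then ((b0 :: acc) ++ [y], y.2.2) else (b0 :: acc, y.2.2)) := by
      simp [pvF1, hy]
    by_cases hc : b0.2.2 + 50 > y.2.2
    · simp only [List.foldl_cons, step, if_pos hc]
      have := ih (acc ++ [y]) y.2.2 hpair.1 hpair.2
      simp only [List.cons_append] at this ⊢
      rw [this, List.filter_cons, decide_eq_true hc]
      simp
    · simp only [List.foldl_cons, step, if_neg hc]
      rw [ih acc y.2.2 hpair.1 hpair.2, List.filter_cons]
      simp [hc]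

-- Phase 2 only ever appends elements of the list it iterates over.
theorem pvP2 (M : List (Int × Int × Int)) :
    ∀ (l e : List (Int × Int × Int)) (h : Int), (∀ x ∈ l, x ∈ M) → (∀ x ∈ e, x ∈ M) →
      ∃ e', (l.foldl pvF2 (M ++ e, h)).1 = M ++ e' ∧ ∀ x ∈ e', x ∈ M := by
  intro l
  induction l with
  | nil => intro e h _ he; exact ⟨e, rfl, he⟩
  | cons y l ih =>
    intro e h hl he
    have hd : (pvF2 (M ++ e, h) y).1 = M ++ e ∨ (pvF2 (M ++ e, h) y).1 = M ++ (e ++ [y]) := by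
      unfold pvF2
      by_cases h1 : (M ++ e, h).2 ≤ y.2.1
      · rw [if_pos h1]
        cases hM : M ++ e with
        | nil =>
          right
          obtain ⟨hM1, hM2⟩ := List.append_eq_nil_iff.mp hM
          subst hM1; subst hM2; simp
        | cons b0 t =>
          simp only
          split_ifs
          · right; rw [← hM]; simp [List.append_assoc]
          · left; rw [← hM]
      · rw [if_neg h1]; left; rfl
    simp only [List.foldl_cons]
    rw [← Prod.mk.eta (p := pvF2 (M ++ e, h) y)]
    rcases hd with hs | hs
    · rw [hs]; exact ih e _ (fun x hx => hl x (List.mem_cons_of_mem _ hx)) he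
    · rw [hs]
      refine ih (e ++ [y]) _ (fun x hx => hl x (List.mem_cons_of_mem _ hx)) ?_
      intro x hx
      rcases List.mem_append.1 hx with hx | hx
      · exact he x hx
      · simp at hx; subst hx; exact hl _ List.mem_cons_self

-- head of the stable insertion sort = the left fold that keeps the first minimum
theorem pvP3 {κ : Type} [LinearOrder κ] (key : (Int × Int × Int) → κ)
    (l : List (Int × Int × Int)) :
    ∀ (y : Int × Int × Int) (ys : List (Int × Int × Int)),
    ∃ t, l.foldl (fun acc x => PySem.List.insertBy (fun a b => decide (key a < key b)) x acc)
          (y :: ys)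
        = (l.foldl (fun m x => if key x < key m then x else m) y) :: t := by
  induction l with
  | nil => intro y ys; exact ⟨ys, rfl⟩
  | cons x l ih =>
    intro y ys
    simp only [List.foldl_cons]
    by_cases hc : key x < key y
    · have hins : PySem.List.insertBy (fun a b => decide (key a < key b)) x (y :: ys)
          = x :: y :: ys := by simp [PySem.List.insertBy, hc]
      rw [hins, if_pos hc]; exact ih x (y :: ys)
    · have hins : PySem.List.insertBy (fun a b => decide (key a < key b)) x (y :: ys)
          = y :: PySem.List.insertBy (fun a b => decide (key a < key b)) x ys := by
        simp [PySem.List.insertBy, hc]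
      rw [hins, if_neg hc]; exact ih y _

-- B's fold once z0 and a current best are fixed: a running maximum over the filtered tail
theorem pvB2 (l : List (Int × Int × Int)) :
    ∀ (z0 : Int) (m : Int × Int × Int),
    l.foldl pvG (some z0, some m)
      = (some z0, some (List.foldl pvPick m
          (l.filter (fun b => decide (0 ≤ b.2.2) && decide (b.2.2 < z0 + 50))))) := by
  induction l with
  | nil => intro z0 m; simp
  | cons b l ih =>
    intro z0 m
    simp only [List.foldl_cons, List.filter_cons]
    by_cases hz : 0 ≤ b.2.2
    · by_cases h50 : b.2.2 < z0 + 50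
      · by_cases hlt : m.1 < b.1
        · have : pvG (some z0, some m) b = (some z0, some b) := by
            simp [pvG, hz, h50, hlt]
          rw [this, ih]
          simp [hz, h50, pvPick, hlt]
        · have : pvG (some z0, some m) b = (some z0, some m) := by
            simp [pvG, hz, h50, hlt]
          rw [this, ih]
          simp [hz, h50, pvPick, hlt]
      · have : pvG (some z0, some m) b = (some z0, some m) := by
          simp [pvG, hz, h50]
        rw [this, ih]
        simp [hz, h50]
    · have : pvG (some z0, some m) b = (some z0, some m) := by simp [pvG, hz]
      rw [this, ih]
      simp [hz]

-- the running maximum bounds every element seen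
theorem pvPick_ub (l : List (Int × Int × Int)) :
    ∀ (m : Int × Int × Int), ∀ x ∈ m :: l, x.1 ≤ (List.foldl pvPick m l).1 := by
  induction l with
  | nil => intro m x hx; simp at hx; subst hx; rfl
  | cons y l ih =>
    intro m x hx
    simp only [List.foldl_cons]
    have h1 : m.1 ≤ (pvPick m y).1 := by unfold pvPick; split_ifs with h <;> omega
    have h2 : y.1 ≤ (pvPick m y).1 := by unfold pvPick; split_ifs with h <;> omega
    have hmem : (pvPick m y) ∈ (pvPick m y) :: l := List.mem_cons_self
    rcases List.mem_cons.1 hx with hx | hx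
    · subst hx; exact le_trans h1 (ih _ _ hmem)
    · rcases List.mem_cons.1 hx with hx | hx
      · subst hx; exact le_trans h2 (ih _ _ hmem)
      · exact ih _ x (List.mem_cons_of_mem _ hx)

-- elements never exceeding the accumulator leave the running maximum unchanged
theorem pvPick_fixed (e : List (Int × Int × Int)) :
    ∀ (m : Int × Int × Int), (∀ x ∈ e, x.1 ≤ m.1) → List.foldl pvPick m e = m := by
  induction e with
  | nil => intro m _; rfl
  | cons y e ih =>
    intro m hm
    have hy : ¬ m.1 < y.1 := not_lt.2 (hm y List.mem_cons_self)
    simp only [List.foldl_cons, pvPick, if_neg hy]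
    exact ih m (fun x hx => hm x (List.mem_cons_of_mem _ hx))

theorem pvPick_append (f e : List (Int × Int × Int)) (m : Int × Int × Int)
    (he : ∀ x ∈ e, x ∈ m :: f) :
    List.foldl pvPick m (f ++ e) = List.foldl pvPick m f := by
  rw [List.foldl_append]
  exact pvPick_fixed e _ (fun x hx =>
    le_trans (le_refl x.1) (pvPick_ub f m x (he x hx)))

-- the whole pipeline, by induction over the z-sorted list
theorem pvMain (S : List (Int × Int × Int))
    (hpair : S.Pairwise (fun a b => a.2.2 ≤ b.2.2))
    (hex : ∃ b ∈ S, 0 ≤ b.2.2) :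
    (match PySem.List.sorted
        ((PySem.List.sorted ((S.foldl pvF1 ([], 0)).1) (fun box => box.2.1) false).foldl
          pvF2 ((S.foldl pvF1 ([], 0)).1, 0)).1 (fun box => -box.1) false with
      | best :: _ => best
      | [] => ((0 : Int), (0 : Int), (0 : Int)))
    = (match (S.foldl pvG (none, none)).2 with
      | some best => best
      | none => ((0 : Int), (0 : Int), (0 : Int))) := by
  induction S with
  | nil => obtain ⟨b, hb, _⟩ := hex; simp at hb
  | cons x l ih =>
    rw [List.pairwise_cons] at hpair
    by_cases hx : 0 ≤ x.2.2
    · -- x is the first accepted box: z0 = x.2.2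
      have hA1 : pvF1 ([], 0) x = ([x], x.2.2) := by simp [pvF1, hx]
      have hmono : ∀ y ∈ l, x.2.2 ≤ y.2.2 := hpair.1
      set F := l.filter (fun b => decide (x.2.2 + 50 > b.2.2)) with hF
      have hnl1 : ((x :: l).foldl pvF1 ([], 0)).1 = x :: F := by
        simp only [List.foldl_cons, hA1]
        exact pvP1b l x [] x.2.2 hmono hpair.2
      -- B side
      have hB1 : pvG (none, none) x = (some x.2.2, some x) := by
        simp [pvG, hx]
      have hBall : ((x :: l).foldl pvG (none, none)).2
          = some (List.foldl pvPick x
              (l.filter (fun b => decide (0 ≤ b.2.2) && decide (b.2.2 < x.2.2 + 50)))) := by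
        simp only [List.foldl_cons, hB1, pvB2]
      have hfilt : l.filter (fun b => decide (0 ≤ b.2.2) && decide (b.2.2 < x.2.2 + 50)) = F := by
        rw [hF]
        apply List.filter_congr
        intro b hb
        have : 0 ≤ b.2.2 := le_trans hx (hmono b hb)
        simp [this, gt_iff_lt]
      -- phase 2
      obtain ⟨e, he1, he2⟩ := pvP2 (x :: F)
        (PySem.List.sorted (x :: F) (fun box => box.2.1) false) [] 0
        (fun b hb => (PySem.List.mem_sorted _ _ _ b).1 hb) (by intro b hb; simp at hb)
      simp only [List.append_nil] at he1
      -- phase 3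
      rw [hnl1, he1, hBall, hfilt]
      rw [PySem.List.sorted_eq_foldl_insertBy]
      have hsplit : (x :: F) ++ e = x :: (F ++ e) := by simp
      rw [hsplit]
      simp only [List.foldl_cons]
      have hins0 : PySem.List.insertBy
          (fun a b => decide ((fun box => -box.1) a < (fun box => -box.1) b)) x ([] : List _)
          = [x] := by simp [PySem.List.insertBy]
      rw [hins0]
      obtain ⟨t, ht⟩ := pvP3 (fun box => -box.1) (F ++ e) x []
      rw [ht]
      have hstep : (fun (m b : Int × Int × Int) =>
          if (fun box => -box.1) b < (fun box => -box.1) m then b else m) = pvPick := by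
        funext m b
        simp only [pvPick]
        by_cases hc : m.1 < b.1
        · rw [if_pos (by simpa using neg_lt_neg hc), if_pos hc]
        · rw [if_neg (by simpa using hc), if_neg hc]
      simp only [hstep]
      rw [pvPick_append F e x he2]
    · -- x has negative z: both loops skip it entirely
      have hA0 : pvF1 ([], 0) x = ([], 0) := by simp [pvF1, hx]
      have hB0 : pvG (none, none) x = (none, none) := by simp [pvG, hx]
      have hex' : ∃ b ∈ l, 0 ≤ b.2.2 := by
        obtain ⟨b, hb, hbz⟩ := hex
        rcases List.mem_cons.1 hb with hb | hb
        · exact absurd (hb ▸ hbz) hx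
        · exact ⟨b, hb, hbz⟩
      simp only [List.foldl_cons, hA0, hB0]
      exact ih hpair.2 hex'

-- ===== VERDICT (by name: the statement is the Claim_ definition above) =====
theorem best_pick_spec : Claim_equal_best_pick := by
  intro boxes _ hpre
  unfold Spec_best_pick best_pick best_pick_alt
  have hpair := PySem.List.sorted_pairwise boxes (fun box => box.2.2)
  have hex : ∃ b ∈ PySem.List.sorted boxes (fun box => box.2.2) false, 0 ≤ b.2.2 := by
    obtain ⟨b, hb, hbz⟩ := hpre
    exact ⟨b, (PySem.List.mem_sorted _ _ _ b).2 hb, hbz⟩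
  exact pvMain _ hpair hex
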